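-- pv_equiv track=rewrite | github.com/kapilmathe/python_apps | python_scripts/largest_fibbo_series.py | larget_fibb_seq
-- ===== SOURCE A (Python) =====
-- def fibbo_series(max_val):
--     result = set()
--     if max_val < 0:
--         return result
--     else:
--         prev = 0
--         curr = 1
--         result.add(0)
--         i = 1
--         while curr <= max_val:
--             result.add(curr)
--             curr, prev = (curr+prev), curr
--             i += 1
--         return result
--
-- def larget_fibb_seq(l):
--     result = list()
--     if len(l) == 0:
--         return result
--     max_val = max(l)
--     fs = fibbo_series(max_val)
--     for x in l:
--         if x in fs:
--             result.append(x)
--     return result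
-- ===== SOURCE B (Python) =====
-- def _is_fib(x):
--     if x < 0:
--         return False
--     a, b = 0, 1
--     while b < x:
--         a, b = b, a + b
--     return x == a or x == b
--
-- def larget_fibb_seq(l):
--     return [x for x in l if _is_fib(x)]
-- ===== Notes on version B (the rewrite author's own statement) =====
-- stated objective: simpler
-- what changed: Instead of computing max(l), materialising the whole Fibonacci set up to it and filtering by set membership, B tests each element directly with a tiny per-element Fibonacci check (advance a fib pair until it reaches x), removing max(), the set and the empty-list guard.
import Mathlib
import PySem

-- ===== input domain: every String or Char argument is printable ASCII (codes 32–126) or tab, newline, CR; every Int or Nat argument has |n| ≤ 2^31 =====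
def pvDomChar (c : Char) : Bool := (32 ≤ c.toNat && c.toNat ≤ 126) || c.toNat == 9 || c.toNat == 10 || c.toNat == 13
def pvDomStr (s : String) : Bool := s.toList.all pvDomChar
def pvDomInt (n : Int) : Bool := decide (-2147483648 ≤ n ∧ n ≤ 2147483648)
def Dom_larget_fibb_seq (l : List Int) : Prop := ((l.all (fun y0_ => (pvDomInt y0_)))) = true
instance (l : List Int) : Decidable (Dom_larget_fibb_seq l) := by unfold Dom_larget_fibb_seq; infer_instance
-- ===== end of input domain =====

-- B replaces A's precomputed Fibonacci set (up to max(l)) with a direct per-element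
-- Fibonacci test; same return value, simpler decomposition (no max(), no set).


-- ===== PORT A =====
-- the 'while curr <= max_val' loop of fibbo_series; the invariant hypotheses
-- (0 ≤ prev ≤ curr, 1 ≤ curr) only justify termination
def fibboLoop (max_val prev curr i : Int) (result : PySem.Set Int)
    (hp : 0 ≤ prev) (_hpc : prev ≤ curr) (hc : 1 ≤ curr) : PySem.Set Int :=
  if _h : curr ≤ max_val then
    fibboLoop max_val curr (curr + prev) (i + 1) (PySem.Set.add result curr)
      (by omega) (by omega) (by omega)
  else result
termination_by (2 * max_val + 2 - (prev + curr)).toNat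
decreasing_by omega

def fibbo_series (max_val : Int) : PySem.Set Int :=
  if max_val < 0 then PySem.Set.empty
  else fibboLoop max_val 0 1 1 (PySem.Set.add PySem.Set.empty 0) (by omega) (by omega) (by omega)

def larget_fibb_seq (l : List Int) : List Int :=
  if l.length == 0 then []
  else
    match PySem.List.max? l (fun y => y) with
    | none => []   -- unreachable: l ≠ []
    | some max_val =>
      let fs := fibbo_series max_val
      l.foldl (fun result x => if PySem.Set.contains fs x then result ++ [x] else result) []

-- ===== PORT B =====
-- the 'while b < x' loop of _is_fib; hypotheses only justify termination
def isFibLoop (x a b : Int) (ha : 0 ≤ a) (_hab : a ≤ b) (hb : 1 ≤ b) : Bool :=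
  if _h : b < x then isFibLoop x b (a + b) (by omega) (by omega) (by omega)
  else (x == a || x == b)
termination_by (2 * x - (a + b)).toNat
decreasing_by omega

def is_fib (x : Int) : Bool :=
  if x < 0 then false else isFibLoop x 0 1 (by omega) (by omega) (by omega)

def larget_fibb_seq_alt (l : List Int) : List Int := l.filter is_fib

-- ===== PRECONDITION & SPEC =====
def Spec_larget_fibb_seq (l : List Int) (out : List Int) : Prop := out = larget_fibb_seq_alt l
instance (l : List Int) (out : List Int) : Decidable (Spec_larget_fibb_seq l out) := by unfold Spec_larget_fibb_seq; infer_instance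

-- ===== CLAIM (what is proved, stated in full; the proofs are below) =====
def Claim_equal_larget_fibb_seq : Prop := ∀ (l : List Int), Dom_larget_fibb_seq l → Spec_larget_fibb_seq l (larget_fibb_seq l)

-- ===== LEMMAS AND PROOFS =====

theorem fib_cast_mono {j k : Nat} (h : j ≤ k) : ((Nat.fib j : Int)) ≤ (Nat.fib k : Int) := by
  exact_mod_cast Nat.fib_mono h

-- B's loop returns true iff x is a Fibonacci number, given the state is a fib pair below x
theorem isFibLoop_iff (x a b : Int) (ha : 0 ≤ a) (hab : a ≤ b) (hb : 1 ≤ b)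
    (j : Nat) (hja : a = (Nat.fib j : Int)) (hjb : b = (Nat.fib (j + 1) : Int)) (hax : a ≤ x) :
    (isFibLoop x a b ha hab hb = true ↔ ∃ k, x = (Nat.fib k : Int)) := by
  induction a, b, ha, hab, hb using isFibLoop.induct (x := x) generalizing j with
  | case1 a b ha hab hb h ih =>
    rw [isFibLoop, dif_pos h]
    exact ih (j + 1) hjb (by push_cast [Nat.fib_add_two]; omega) (by omega)
  | case2 a b ha hab hb h =>
    rw [isFibLoop, dif_neg h]
    simp only [Bool.or_eq_true, beq_iff_eq]
    constructor
    · rintro (rfl | rfl)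
      · exact ⟨j, hja⟩
      · exact ⟨j + 1, hjb⟩
    · rintro ⟨k, rfl⟩
      rcases Nat.lt_or_ge j k with hk | hk
      · right; have := fib_cast_mono (show j + 1 ≤ k by omega); omega
      · left; have := fib_cast_mono hk; omega

theorem is_fib_iff (x : Int) :
    (is_fib x = true ↔ 0 ≤ x ∧ ∃ k, x = (Nat.fib k : Int)) := by
  unfold is_fib
  split
  · simp; omega
  · rename_i h
    rw [isFibLoop_iff x 0 1 _ _ _ 0 (by simp) (by simp) (by omega)]
    constructor
    · exact fun hk => ⟨by omega, hk⟩
    · exact fun hk => hk.2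

-- A's loop adds exactly the Fibonacci numbers fib k (k ≥ j+1) that are ≤ max_val
theorem fibboLoop_mem (max_val prev curr i : Int) (r : PySem.Set Int)
    (hp : 0 ≤ prev) (hpc : prev ≤ curr) (hc : 1 ≤ curr)
    (j : Nat) (hja : prev = (Nat.fib j : Int)) (hjb : curr = (Nat.fib (j + 1) : Int)) (y : Int) :
    (y ∈ fibboLoop max_val prev curr i r hp hpc hc ↔
      y ∈ r ∨ ∃ k, j + 1 ≤ k ∧ y = (Nat.fib k : Int) ∧ y ≤ max_val) := by
  induction prev, curr, i, r, hp, hpc, hc using fibboLoop.induct (max_val := max_val) generalizing j with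
  | case1 prev curr i r hp hpc hc h ih =>
    rw [fibboLoop, dif_pos h]
    rw [ih (j + 1) hjb (by push_cast [Nat.fib_add_two]; omega)]
    rw [PySem.Set.mem_add]
    constructor
    · rintro ((hy | rfl) | ⟨k, hk, rfl, hkm⟩)
      · exact Or.inl hy
      · exact Or.inr ⟨j + 1, le_refl _, hjb, by omega⟩
      · exact Or.inr ⟨k, by omega, rfl, hkm⟩
    · rintro (hy | ⟨k, hk, rfl, hkm⟩)
      · exact Or.inl (Or.inl hy)
      · rcases eq_or_lt_of_le hk with rfl | hk2
        · exact Or.inl (Or.inr hjb.symm)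
        · exact Or.inr ⟨k, by omega, rfl, hkm⟩
  | case2 prev curr i r hp hpc hc h =>
    rw [fibboLoop, dif_neg h]
    constructor
    · exact Or.inl
    · rintro (hy | ⟨k, hk, rfl, hkm⟩)
      · exact hy
      · exact absurd (fib_cast_mono hk) (by omega)

theorem fibbo_series_mem (max_val y : Int) :
    (y ∈ fibbo_series max_val ↔ 0 ≤ max_val ∧ y ≤ max_val ∧ ∃ k, y = (Nat.fib k : Int)) := by
  unfold fibbo_series
  split
  · rename_i h
    simp only [PySem.Set.empty]
    simp; omega
  · rename_i h
    rw [fibboLoop_mem _ _ _ _ _ _ _ _ 0 (by simp) (by simp)]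
    simp only [PySem.Set.empty, PySem.Set.mem_add, List.not_mem_nil, false_or]
    constructor
    · rintro (rfl | ⟨k, _, rfl, hkm⟩)
      · exact ⟨by omega, by omega, 0, by simp⟩
      · exact ⟨by omega, hkm, k, rfl⟩
    · rintro ⟨_, hym, k, rfl⟩
      rcases Nat.eq_zero_or_pos k with rfl | hk
      · left; simp
      · right; exact ⟨k, by omega, rfl, hym⟩

-- ===== VERDICT (by name: the statement is the Claim_ definition above) =====
theorem larget_fibb_seq_spec : Claim_equal_larget_fibb_seq := by
  intro l _
  show larget_fibb_seq l = larget_fibb_seq_alt l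
  unfold larget_fibb_seq larget_fibb_seq_alt
  match l with
  | [] => rfl
  | x :: t =>
    simp only [List.length_cons, PySem.List.max?_id_cons]
    have hmax : ∀ y ∈ x :: t, y ≤ t.foldl max x :=
      PySem.List.max?_isMax (m := t.foldl max x) (key := fun y => y) (PySem.List.max?_id_cons x t)
    rw [PySem.List.foldl_append_if_eq_filter]
    simp only [List.nil_append]
    apply List.filter_congr
    intro y hy
    rw [Bool.eq_iff_iff, PySem.Set.contains_iff, fibbo_series_mem, is_fib_iff]
    have hym := hmax y hy
    constructor
    · rintro ⟨_, _, k, rfl⟩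
      exact ⟨by positivity, k, rfl⟩
    · rintro ⟨hy0, k, rfl⟩
      exact ⟨by omega, by omega, k, rfl⟩
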